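-- pv_equiv track=rewrite | github.com/yimingnzhao/TAPER-Results | Scripts_Error_Simulation/unionK.py | getXCount
-- ===== SOURCE A (Python) =====
-- def getXCount( small, pos, limit ):
--     char = small[pos]
--     x_count = 1
--     pos_count = 1
--     while pos < len(small):
--         if small[pos] == 'X':
--             x_count += 1
--             pos_count += 1
--             pos += 1
--         elif small[pos] == '-':
--             pos_count += 1
--             pos += 1
--         else:
--             break
--     return (x_count, pos_count)
-- ===== SOURCE B (Python) =====
-- def getXCount(small, pos, limit):
--     char = small[pos]  # preserve IndexError on out-of-range pos
--     tail = small[pos:]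
--     end = 0
--     while end < len(tail) and tail[end] in 'X-':
--         end += 1
--     run = tail[:end]
--     return (1 + run.count('X'), 1 + len(run))
-- ===== Notes on version B (the rewrite author's own statement) =====
-- stated objective: simpler
-- what changed: B slices the suffix starting at pos, finds the end of the maximal 'X'/'-' run, and derives both counts from that run with count/len, instead of A's single loop that increments two counters while mutating the index.
-- intended difference: For negative in-range pos where the suffix small[pos:] is all 'X'/'-' and the string starts with 'X' or '-', A's negative index keeps wrapping and re-scans the string from index 0, counting the leading run a second time (e.g. getXCount('X',-1,0)=(3,3)); B returns the counts of the single run starting at pos ((2,2)), which is the intended value. — e.g. on getXCount("X", -1, 0): A returns (3, 3), B returns (2, 2)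
import Mathlib
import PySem

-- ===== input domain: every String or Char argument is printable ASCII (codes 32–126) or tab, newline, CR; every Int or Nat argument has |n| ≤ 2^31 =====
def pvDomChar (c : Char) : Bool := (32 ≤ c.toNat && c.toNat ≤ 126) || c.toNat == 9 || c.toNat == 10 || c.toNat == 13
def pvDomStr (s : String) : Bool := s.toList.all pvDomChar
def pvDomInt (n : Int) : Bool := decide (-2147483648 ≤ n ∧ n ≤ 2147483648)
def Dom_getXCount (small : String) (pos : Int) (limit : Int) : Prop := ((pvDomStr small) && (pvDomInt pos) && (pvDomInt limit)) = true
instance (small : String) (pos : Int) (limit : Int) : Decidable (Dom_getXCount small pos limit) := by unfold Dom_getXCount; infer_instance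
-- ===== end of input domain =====

-- B computes the counts by slicing the run out first (simpler decomposition); for negative in-range
-- pos A wraps past the end and re-counts the leading run (see D_ below), B returns the intended counts.


-- ===== PORT A =====
-- A's while loop: pos, x_count, pos_count mutate; small[pos] is Python (negative-wrapping) indexing.
-- fuel = remaining loop iterations ((len - pos).toNat at entry is exactly enough: pos increases by 1
-- each iteration and the loop exits at pos = len); it only makes the recursion structural.
def pvLoopA (s : List Char) (pos x p : Int) : Nat → Int × Int
  | 0 => (x, p)
  | fuel + 1 =>
    if pos < (s.length : Int) then
      match PySem.List.pyGet? s pos with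
      | some c =>
        if c = 'X' then pvLoopA s (pos + 1) (x + 1) (p + 1) fuel
        else if c = '-' then pvLoopA s (pos + 1) x (p + 1) fuel
        else (x, p)
      | none => (x, p)   -- Python would raise IndexError; unreachable under Pre_
    else (x, p)

def getXCount (small : String) (pos : Int) (limit : Int) : Int × Int :=
  match PySem.List.pyGet? small.toList pos with
  | none => (0, 0)   -- char = small[pos] raises IndexError here; excluded by Pre_
  | some _ => pvLoopA small.toList pos 1 1 ((small.toList.length : Int) - pos).toNat

-- ===== PORT B =====
-- B's while loop advancing `end` over tail while tail[end] in 'X-'; fuel = tail.length is enough.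
def pvRunEnd (t : List Char) (e : Nat) : Nat → Nat
  | 0 => e
  | fuel + 1 =>
    if h : e < t.length then
      if t[e] == 'X' || t[e] == '-' then pvRunEnd t (e + 1) fuel else e
    else e

def getXCount_alt (small : String) (pos : Int) (limit : Int) : Int × Int :=
  match PySem.List.pyGet? small.toList pos with
  | none => (0, 0)   -- char = small[pos] raises IndexError here; excluded by Pre_
  | some _ =>
    let tail := PySem.List.slice small.toList (some pos) none
    let run := tail.take (pvRunEnd tail 0 tail.length)
    (1 + (run.count 'X' : Int), 1 + (run.length : Int))

-- ===== PRECONDITION & SPEC =====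
-- Pre_: exactly the inputs where Python A returns (small[pos] does not raise IndexError)
def Pre_getXCount (small : String) (pos : Int) (limit : Int) : Prop :=
  PySem.Raise.InRange small.toList.length pos
instance (small : String) (pos : Int) (limit : Int) : Decidable (Pre_getXCount small pos limit) := by
  unfold Pre_getXCount; infer_instance

def pvWitness_getXCount : String × Int × Int := ("X-a", 1, 0)

-- For negative in-range pos where the suffix small[pos:] is all 'X'/'-' and the string starts with
-- 'X' or '-', A's negative index wraps past the end and re-scans from index 0, counting the leading
-- run a second time; B returns the counts of the single run starting at pos, the intended value.
def D_getXCount (small : String) (pos : Int) (limit : Int) : Prop :=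
  pos < 0 ∧
  ((small.toList.take 1 ++ PySem.List.slice small.toList (some pos) none).all
      (fun c => c == 'X' || c == '-')) = true
instance (small : String) (pos : Int) (limit : Int) : Decidable (D_getXCount small pos limit) := by
  unfold D_getXCount; infer_instance

def Spec_getXCount (small : String) (pos : Int) (limit : Int) (out : Int × Int) : Prop :=
  ¬ D_getXCount small pos limit → out = getXCount_alt small pos limit
instance (small : String) (pos : Int) (limit : Int) (out : Int × Int) : Decidable (Spec_getXCount small pos limit out) := by
  unfold Spec_getXCount; infer_instance

def pvDiffWitness_getXCount : String × Int × Int := ("X", -1, 0)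
def pvDiffWitnessOut_getXCount : (Int × Int) × (Int × Int) := ((3, 3), (2, 2))

-- ===== CLAIM (what is proved, stated in full; the proofs are below) =====
def Claim_unchanged_getXCount : Prop := ∀ (small : String) (pos : Int) (limit : Int), Dom_getXCount small pos limit → Pre_getXCount small pos limit → Spec_getXCount small pos limit (getXCount small pos limit)
def Claim_changed_getXCount : Prop := Dom_getXCount (pvDiffWitness_getXCount.1) (pvDiffWitness_getXCount.2.1) (pvDiffWitness_getXCount.2.2) ∧ Pre_getXCount (pvDiffWitness_getXCount.1) (pvDiffWitness_getXCount.2.1) (pvDiffWitness_getXCount.2.2) ∧ D_getXCount (pvDiffWitness_getXCount.1) (pvDiffWitness_getXCount.2.1) (pvDiffWitness_getXCount.2.2) ∧ getXCount (pvDiffWitness_getXCount.1) (pvDiffWitness_getXCount.2.1) (pvDiffWitness_getXCount.2.2) = pvDiffWitnessOut_getXCount.1 ∧ getXCount_alt (pvDiffWitness_getXCount.1) (pvDiffWitness_getXCount.2.1) (pvDiffWitness_getXCount.2.2) = pvDiffWitnessOut_getXCount.2 ∧ pvDiffWitnessOut_getXCount.1 ≠ pvDiffWitnessOut_getXCount.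2
def Claim_exact_getXCount : Prop := ∀ (small : String) (pos : Int) (limit : Int), Dom_getXCount small pos limit → Pre_getXCount small pos limit → D_getXCount small pos limit → getXCount small pos limit ≠ getXCount_alt small pos limit

-- ===== LEMMAS AND PROOFS =====
-- the run predicate
def pvP (c : Char) : Bool := c == 'X' || c == '-'

-- reference shape of A's loop as a structural recursion over the list of chars it scans
def pvSpecRun : List Char → Int → Int → Int × Int
  | [], x, p => (x, p)
  | c :: t, x, p =>
    if c = 'X' then pvSpecRun t (x + 1) (p + 1)
    else if c = '-' then pvSpecRun t x (p + 1)
    else (x, p)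

theorem pvSpecRun_cons (c : Char) (t : List Char) (x p : Int) :
    pvSpecRun (c :: t) x p =
      (if c = 'X' then pvSpecRun t (x + 1) (p + 1)
       else if c = '-' then pvSpecRun t x (p + 1) else (x, p)) := rfl

theorem pvSpecRun_eq (t : List Char) : ∀ (x p : Int),
    pvSpecRun t x p = (x + ((t.takeWhile pvP).count 'X' : Int), p + ((t.takeWhile pvP).length : Int)) := by
  induction t with
  | nil => intro x p; simp [pvSpecRun]
  | cons c t ih =>
    intro x p
    by_cases hX : c = 'X'
    · subst hX
      simp [pvSpecRun, pvP, ih]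
      constructor <;> ring
    · by_cases hD : c = '-'
      · subst hD
        simp [pvSpecRun, pvP, ih, hX]
        ring
      · have hP : pvP c = false := by simp [pvP, hX, hD]
        simp [pvSpecRun, hX, hD, hP]

theorem pvLoopA_nonneg (s : List Char) : ∀ (fuel : Nat) (pos x p : Int), 0 ≤ pos →
    ((s.length : Int) - pos).toNat ≤ fuel →
    pvLoopA s pos x p fuel = pvSpecRun (s.drop pos.toNat) x p := by
  intro fuel
  induction fuel with
  | zero =>
    intro pos x p hpos hf
    have hdrop : s.drop pos.toNat = [] := List.drop_eq_nil_of_le (by omega)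
    simp [pvLoopA, hdrop, pvSpecRun]
  | succ fuel ih =>
    intro pos x p hpos hf
    by_cases hlt : pos < (s.length : Int)
    · have hidx : pos.toNat < s.length := by omega
      have hget : PySem.List.pyGet? s pos = some s[pos.toNat] :=
        PySem.List.pyGet?_eq_some_getElem s hpos hlt
      have hdrop : s.drop pos.toNat = s[pos.toNat] :: s.drop (pos.toNat + 1) :=
        (List.getElem_cons_drop hidx).symm
      have htn : (pos + 1).toNat = pos.toNat + 1 := by omega
      rw [pvLoopA]
      simp only [if_pos hlt, hget]
      rw [ih (pos + 1) (x + 1) (p + 1) (by omega) (by omega),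
        ih (pos + 1) x (p + 1) (by omega) (by omega), htn, hdrop, pvSpecRun_cons]
    · have hdrop : s.drop pos.toNat = [] := List.drop_eq_nil_of_le (by omega)
      rw [pvLoopA]
      simp [hlt, hdrop, pvSpecRun]

theorem pvLoopA_neg (s : List Char) : ∀ (fuel : Nat) (pos x p : Int),
    -(s.length : Int) ≤ pos → pos < 0 → ((s.length : Int) - pos).toNat ≤ fuel →
    pvLoopA s pos x p fuel = pvSpecRun (s.drop ((s.length : Int) + pos).toNat ++ s) x p := by
  intro fuel
  induction fuel with
  | zero => intro pos x p hge hneg hf; omega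
  | succ fuel ih =>
    intro pos x p hge hneg hf
    have hlen : 1 ≤ s.length := by omega
    have hlt : pos < (s.length : Int) := by omega
    set j : Nat := ((s.length : Int) + pos).toNat with hj
    have hjlt : j < s.length := by omega
    have hget0 := PySem.List.pyGet?_neg_natCast s (-pos).toNat (by omega) (by omega)
    have hk : (-(((-pos).toNat : Nat) : Int)) = pos := by omega
    rw [hk] at hget0
    have hjj : s.length - (-pos).toNat = j := by omega
    rw [hjj, List.getElem?_eq_getElem hjlt] at hget0
    have hdrop : s.drop j = s[j] :: s.drop (j + 1) := (List.getElem_cons_drop hjlt).symm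
    rw [pvLoopA]
    simp only [if_pos hlt, hget0]
    have hstep : ∀ (x' p' : Int), pvLoopA s (pos + 1) x' p' fuel
        = pvSpecRun (s.drop (j + 1) ++ s) x' p' := by
      intro x' p'
      by_cases hz : pos + 1 = 0
      · have hnil : s.drop (j + 1) = [] := List.drop_eq_nil_of_le (by omega)
        rw [hnil, List.nil_append, hz,
          pvLoopA_nonneg s fuel 0 x' p' le_rfl (by omega)]
        simp
      · have hjj1 : ((s.length : Int) + (pos + 1)).toNat = j + 1 := by omega
        rw [ih (pos + 1) x' p' (by omega) (by omega) (by omega), hjj1]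
    rw [hstep (x + 1) (p + 1), hstep x (p + 1), hdrop, List.cons_append, pvSpecRun_cons]

theorem pvRunEnd_eq (t : List Char) : ∀ (fuel e : Nat), t.length - e ≤ fuel →
    pvRunEnd t e fuel = e + ((t.drop e).takeWhile pvP).length := by
  intro fuel
  induction fuel with
  | zero =>
    intro e hf
    have hdrop : t.drop e = [] := List.drop_eq_nil_of_le (by omega)
    simp [pvRunEnd, hdrop]
  | succ fuel ih =>
    intro e hf
    rw [pvRunEnd]
    by_cases he : e < t.length
    · have hdrop : t.drop e = t[e] :: t.drop (e + 1) := (List.getElem_cons_drop he).symm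
      have hb : (t[e] == 'X' || t[e] == '-') = pvP t[e] := rfl
      rw [dif_pos he, hb, hdrop, List.takeWhile_cons]
      by_cases hP : pvP t[e] = true
      · rw [if_pos hP, if_pos hP, ih (e + 1) (by omega)]
        simp; omega
      · rw [if_neg hP, if_neg hP]
        simp
    · have hdrop : t.drop e = [] := List.drop_eq_nil_of_le (by omega)
      simp [he, hdrop]

theorem pvRunEnd_take (t : List Char) : t.take (pvRunEnd t 0 t.length) = t.takeWhile pvP := by
  rw [pvRunEnd_eq t t.length 0 (by omega)]
  simp only [Nat.zero_add, List.drop_zero]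
  exact (List.prefix_iff_eq_take.mp (List.takeWhile_prefix pvP)).symm

-- B's value under Pre_, with the start index normalized to a Nat j
theorem getXCount_alt_eq (small : String) (pos limit : Int)
    (hpre : Pre_getXCount small pos limit) :
    getXCount_alt small pos limit =
      (1 + ((((small.toList.drop (if 0 ≤ pos then pos.toNat else ((small.toList.length : Int) + pos).toNat)).takeWhile pvP).count 'X' : Int)),
       1 + ((((small.toList.drop (if 0 ≤ pos then pos.toNat else ((small.toList.length : Int) + pos).toNat)).takeWhile pvP).length : Int))) := by
  unfold Pre_getXCount PySem.Raise.InRange at hpre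
  obtain ⟨h1, h2⟩ := hpre
  by_cases hp : 0 ≤ pos
  · have hget : PySem.List.pyGet? small.toList pos = some (small.toList[pos.toNat]'(by omega)) :=
      PySem.List.pyGet?_eq_some_getElem small.toList hp h2
    unfold getXCount_alt
    rw [hget]
    simp only [if_pos hp]
    rw [PySem.List.slice_from small.toList hp, pvRunEnd_take]
  · have hget0 := PySem.List.pyGet?_neg_natCast small.toList (-pos).toNat (by omega) (by omega)
    have hk : (-(((-pos).toNat : Nat) : Int)) = pos := by omega
    rw [hk] at hget0
    have hget : PySem.List.pyGet? small.toList pos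
        = some (small.toList[small.toList.length - (-pos).toNat]'(by omega)) := by
      rw [hget0]; exact List.getElem?_eq_getElem (by omega)
    have hsl := PySem.List.slice_from_neg_natCast small.toList (-pos).toNat (by omega)
    rw [hk] at hsl
    have hjj : small.toList.length - (-pos).toNat = ((small.toList.length : Int) + pos).toNat := by omega
    unfold getXCount_alt
    rw [hget]
    simp only [if_neg hp]
    rw [hsl, hjj, pvRunEnd_take]

-- A's value under Pre_: pvSpecRun over the char sequence the loop scans
theorem getXCount_eq (small : String) (pos limit : Int)
    (hpre : Pre_getXCount small pos limit) :
    getXCount small pos limit =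
      pvSpecRun ((small.toList.drop (if 0 ≤ pos then pos.toNat else ((small.toList.length : Int) + pos).toNat))
        ++ (if 0 ≤ pos then [] else small.toList)) 1 1 := by
  unfold Pre_getXCount PySem.Raise.InRange at hpre
  obtain ⟨h1, h2⟩ := hpre
  by_cases hp : 0 ≤ pos
  · have hget : PySem.List.pyGet? small.toList pos = some (small.toList[pos.toNat]'(by omega)) :=
      PySem.List.pyGet?_eq_some_getElem small.toList hp h2
    unfold getXCount
    rw [hget]
    simp only [if_pos hp, List.append_nil]
    exact pvLoopA_nonneg small.toList _ pos 1 1 hp le_rfl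
  · have hget0 := PySem.List.pyGet?_neg_natCast small.toList (-pos).toNat (by omega) (by omega)
    have hk : (-(((-pos).toNat : Nat) : Int)) = pos := by omega
    rw [hk] at hget0
    have hget : PySem.List.pyGet? small.toList pos
        = some (small.toList[small.toList.length - (-pos).toNat]'(by omega)) := by
      rw [hget0]; exact List.getElem?_eq_getElem (by omega)
    unfold getXCount
    rw [hget]
    simp only [if_neg hp]
    exact pvLoopA_neg small.toList _ pos 1 1 (by omega) (by omega) le_rfl

-- the if-condition left by List.takeWhile_append is 'l is all pvP'
theorem pvTakeWhileLen_iff (l : List Char) :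
    ((l.takeWhile pvP).length = l.length) ↔ (∀ c ∈ l, pvP c = true) := by
  constructor
  · intro h
    rw [← List.takeWhile_eq_self_iff (p := pvP)]
    exact (List.takeWhile_prefix pvP).eq_of_length h
  · intro h
    rw [List.takeWhile_eq_self_iff.mpr h]

-- small[pos:] for an in-range negative pos is the suffix from len + pos
theorem pvSlice_neg (s : List Char) (pos : Int) (h1 : -(s.length : Int) ≤ pos) (h2 : pos < 0) :
    PySem.List.slice s (some pos) none = s.drop (((s.length : Int) + pos).toNat) := by
  have h := PySem.List.slice_from_neg_natCast s (-pos).toNat (by omega)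
  have hk : (-(((-pos).toNat : Nat) : Int)) = pos := by omega
  rw [hk] at h
  rw [h]
  congr 1
  omega

-- ===== VERDICT (by name: the statement is the Claim_ definition above) =====
theorem getXCount_spec : Claim_unchanged_getXCount := by
  intro small pos limit _hdom hpre hnd
  rw [getXCount_eq small pos limit hpre, getXCount_alt_eq small pos limit hpre]
  by_cases hp : 0 ≤ pos
  · simp only [if_pos hp, List.append_nil]
    rw [pvSpecRun_eq]
  · unfold Pre_getXCount PySem.Raise.InRange at hpre
    simp only [if_neg hp]
    set j : Nat := ((small.toList.length : Int) + pos).toNat with hj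
    set l : List Char := small.toList.drop j with hl
    unfold D_getXCount at hnd
    push Not at hnd
    have hnd' := hnd (by omega)
    rw [pvSlice_neg small.toList pos (by omega) (by omega), ← hj, ← hl, List.all_append] at hnd'
    rw [pvSpecRun_eq, List.takeWhile_append]
    by_cases hall : ∀ c ∈ l, pvP c = true
    · -- the suffix is all X/-: then the head of small is not X/-, so nothing is appended
      have hhead : ¬ ((small.toList.take 1).all (fun c => c == 'X' || c == '-') = true) := by
        intro h
        exact hnd' (by rw [h, List.all_eq_true.mpr (fun c hc => by simpa [pvP] using hall c hc)]; rfl)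
      have htws : small.toList.takeWhile pvP = [] := by
        cases hs : small.toList with
        | nil => simp
        | cons c rest =>
          have hc : pvP c = false := by
            cases hpc : pvP c with
            | false => rfl
            | true =>
              exact absurd (by simp [hs]; simpa [pvP] using hpc) hhead
          rw [List.takeWhile_cons, hc]
          simp
      rw [if_pos ((pvTakeWhileLen_iff l).mpr hall), htws, List.append_nil,
        List.takeWhile_eq_self_iff.mpr hall]
    · rw [if_neg (fun h => hall ((pvTakeWhileLen_iff l).mp h))]

theorem getXCount_changed : Claim_changed_getXCount := by
  unfold Claim_changed_getXCount; decide

theorem getXCount_tight : Claim_exact_getXCount := by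
  intro small pos limit _hdom hpre hd
  have hpre' := hpre
  unfold Pre_getXCount PySem.Raise.InRange at hpre'
  obtain ⟨hneg, hallb⟩ := hd
  rw [pvSlice_neg small.toList pos (by omega) (by omega), List.all_append] at hallb
  rw [getXCount_eq small pos limit hpre, getXCount_alt_eq small pos limit hpre]
  simp only [if_neg (by omega : ¬ 0 ≤ pos)]
  set j : Nat := ((small.toList.length : Int) + pos).toNat with hj
  set l : List Char := small.toList.drop j with hl
  obtain ⟨hheadb, hallb⟩ : ((small.toList.take 1).all (fun c => c == 'X' || c == '-') = true)
      ∧ (l.all (fun c => c == 'X' || c == '-') = true) := by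
    rw [hl, hj]; simpa using hallb
  have hall' : ∀ c ∈ l, pvP c = true := by
    intro c hc
    have := List.all_eq_true.mp hallb c (by simpa [hl, hj] using hc)
    simpa [pvP] using this
  -- the leading run of small is nonempty
  have hrun : 1 ≤ (small.toList.takeWhile pvP).length := by
    cases hs : small.toList with
    | nil => rw [hs] at hpre'; simp at hpre'; omega
    | cons c rest =>
      have hc : pvP c = true := by simpa [hs, pvP] using hheadb
      simp [hc]
  rw [pvSpecRun_eq, List.takeWhile_append, if_pos ((pvTakeWhileLen_iff l).mpr hall'),
    List.takeWhile_eq_self_iff.mpr hall']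
  intro h
  have h2 := congrArg Prod.snd h
  simp only [List.length_append] at h2
  omega
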